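-- pv_equiv track=rewrite | github.com/anand434/Project-Euler | euler30.py | dfp
-- ===== SOURCE A (Python) =====
-- def dfp(x):
--     s = str(x)
--     sum = 0
--     for i in s:
--         sum += (int(i)**5)
--     if(x == sum):
--         return True
--     return False
-- ===== SOURCE B (Python) =====
-- _PAIR = [(r % 10) ** 5 + (r // 10) ** 5 for r in range(100)]
--
-- def _sps(n):
--     if n == 0:
--         return 0
--     n, r = divmod(n, 100)
--     return _PAIR[r] + _sps(n)
--
-- def dfp(x):
--     return x == _sps(x)
-- ===== Notes on version B (the rewrite author's own statement) =====
-- stated objective: alternative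
-- what changed: Replaces A's string conversion and per-character int()**5 loop with a recursive base-100 decomposition that looks up the fifth-power sum of each two-digit chunk in a precomputed 100-entry table.
import Mathlib
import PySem

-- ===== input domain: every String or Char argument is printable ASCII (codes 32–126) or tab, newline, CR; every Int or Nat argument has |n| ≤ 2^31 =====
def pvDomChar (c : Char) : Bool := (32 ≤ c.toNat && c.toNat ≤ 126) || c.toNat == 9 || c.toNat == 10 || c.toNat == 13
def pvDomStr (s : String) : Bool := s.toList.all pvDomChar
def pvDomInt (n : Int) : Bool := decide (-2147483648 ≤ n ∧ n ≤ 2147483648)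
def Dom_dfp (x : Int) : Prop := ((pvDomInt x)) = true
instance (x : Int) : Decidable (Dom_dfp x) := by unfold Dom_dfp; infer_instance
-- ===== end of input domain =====

-- B replaces A's per-character string loop with a recursive base-100 decomposition
-- over a precomputed 100-entry chunk table (alternative, same cost).

-- ===== PORT A =====
-- A: s = str(x); sum over chars of int(c)**5; return x == sum.
-- int(c) is PySem.Int.ofChars? [c]; .getD 0 is never the taken branch on Pre_ (x ≥ 0: every char is a digit).
def dfp (x : Int) : Bool :=
  let s := PySem.Int.toChars x
  let sum := s.foldl (fun acc c => acc + ((PySem.Int.ofChars? [c]).getD 0) ^ 5) 0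
  if x == sum then true else false

-- ===== PORT B =====
-- B: _PAIR = [(r%10)**5 + (r//10)**5 for r in range(100)]
def pvPairTable : List Int := (List.range 100).map (fun r => (((r % 10) ^ 5 + (r / 10) ^ 5 : Nat) : Int))

-- B: _sps(n) = 0 if n == 0 else _PAIR[n % 100] + _sps(n // 100).
-- Python B recurses on a nonnegative n (Pre_: x ≥ 0; Python B diverges on negatives),
-- so it is the structural recursion below on x.toNat.
def sps (n : Nat) : Int :=
  if h : n = 0 then 0
  else pvPairTable.getD (n % 100) 0 + sps (n / 100)
decreasing_by exact Nat.div_lt_self (Nat.pos_of_ne_zero h) (by norm_num)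

def dfp_alt (x : Int) : Bool := x == sps x.toNat

-- ===== PRECONDITION & SPEC =====
-- Pre_ excludes x < 0, on which A raises ValueError (int('-') on the sign character).
def Pre_dfp (x : Int) : Prop := 0 ≤ x
instance (x : Int) : Decidable (Pre_dfp x) := by unfold Pre_dfp; infer_instance
def pvWitness_dfp : Int := 4150

def Spec_dfp (x : Int) (out : Bool) : Prop := out = dfp_alt x
instance (x : Int) (out : Bool) : Decidable (Spec_dfp x out) := by unfold Spec_dfp; infer_instance

-- ===== CLAIM (what is proved, stated in full; the proofs are below) =====
def Claim_equal_dfp : Prop := ∀ (x : Int), Dom_dfp x → Pre_dfp x → Spec_dfp x (dfp x)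

-- ===== LEMMAS AND PROOFS =====

-- proof-only helper: the base-10 digit-fifth-power sum, bridging A's digit string and B's base-100 chunks
def pow5sum (n : Nat) : Nat :=
  if h : n = 0 then 0
  else pow5sum (n / 10) + (n % 10) ^ 5
decreasing_by exact Nat.div_lt_self (Nat.pos_of_ne_zero h) (by norm_num)

-- int(c) of a single decimal digit character
lemma ofChars?_digitChar (d : Nat) (hd : d < 10) :
    PySem.Int.ofChars? [Nat.digitChar d] = some (d : Int) := by
  interval_cases d <;> decide

lemma pow5sum_eq (n : Nat) : pow5sum n = pow5sum (n / 10) + (n % 10) ^ 5 := by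
  rw [pow5sum]
  split
  · rename_i h; subst h; simp [pow5sum]
  · rfl

lemma pairTable_getD (r : Nat) (hr : r < 100) :
    pvPairTable.getD r 0 = (((r % 10) ^ 5 + (r / 10) ^ 5 : Nat) : Int) := by
  unfold pvPairTable
  rw [List.getD_eq_getElem?_getD, List.getElem?_map, List.getElem?_range hr]
  rfl

-- B's base-100 recursion computes the base-10 digit-fifth-power sum
lemma sps_eq_pow5sum (n : Nat) : sps n = (pow5sum n : Int) := by
  induction n using Nat.strong_induction_on with
  | _ n ih =>
    by_cases h0 : n = 0
    · subst h0; simp [sps, pow5sum]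
    · rw [sps]
      rw [dif_neg h0]
      rw [ih (n / 100) (Nat.div_lt_self (Nat.pos_of_ne_zero h0) (by norm_num))]
      rw [pairTable_getD (n % 100) (Nat.mod_lt _ (by norm_num))]
      have h1 : pow5sum n = pow5sum (n / 100) + (n / 10 % 10) ^ 5 + (n % 10) ^ 5 := by
        rw [pow5sum_eq n, pow5sum_eq (n / 10), Nat.div_div_eq_div_mul]
      have e1 : n % 100 % 10 = n % 10 := by omega
      have e2 : n % 100 / 10 = n / 10 % 10 := by omega
      rw [h1, e1, e2]
      push_cast
      ring

-- the digit-emitting core of A: folding A's step over the emitted digits adds pow5sum n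
lemma foldl_toDigitsCore (fuel : Nat) :
    ∀ (n : Nat) (l : List Char) (a : Int), 0 < fuel → n < 10 ^ fuel →
    (Nat.toDigitsCore 10 fuel n l).foldl
        (fun acc c => acc + ((PySem.Int.ofChars? [c]).getD 0) ^ 5) a
      = l.foldl (fun acc c => acc + ((PySem.Int.ofChars? [c]).getD 0) ^ 5)
          (a + (pow5sum n : Int)) := by
  induction fuel with
  | zero => intro n l a hf; omega
  | succ f ih =>
    intro n l a _ hn
    rw [Nat.toDigitsCore]
    by_cases h10 : n / 10 = 0
    · rw [if_pos h10]
      rw [List.foldl_cons]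
      rw [ofChars?_digitChar (n % 10) (Nat.mod_lt _ (by norm_num))]
      have : pow5sum n = (n % 10) ^ 5 := by
        rw [pow5sum_eq n, h10]; simp [pow5sum]
      rw [this]
      simp only [Option.getD_some]
      push_cast
      ring_nf
    · rw [if_neg h10]
      have hfpos : 0 < f := by
        by_contra hc
        have : f = 0 := by omega
        subst this
        simp at hn
        omega
      have hlt : n / 10 < 10 ^ f := by
        have : n < 10 ^ f * 10 := by
          rw [← pow_succ]; exact hn
        exact Nat.div_lt_of_lt_mul (by omega)
      rw [ih (n / 10) _ a hfpos hlt]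
      simp only [List.foldl_cons]
      rw [ofChars?_digitChar (n % 10) (Nat.mod_lt _ (by norm_num))]
      rw [pow5sum_eq n]
      simp only [Option.getD_some]
      push_cast
      ring_nf

lemma n_lt_pow (n : Nat) : n < 10 ^ (n + 1) := by
  calc n < 2 ^ n := Nat.lt_two_pow_self
    _ ≤ 10 ^ n := Nat.pow_le_pow_left (by norm_num) n
    _ ≤ 10 ^ (n + 1) := Nat.pow_le_pow_right (by norm_num) (Nat.le_succ n)

-- ===== VERDICT (by name: the statement is the Claim_ definition above) =====
theorem dfp_spec : Claim_equal_dfp := by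
  intro x _ hpre
  unfold Spec_dfp dfp dfp_alt
  have hx : ¬ x < 0 := by unfold Pre_dfp at hpre; omega
  simp only [PySem.Int.toChars, if_neg hx, Nat.toDigits]
  rw [foldl_toDigitsCore (x.toNat + 1) x.toNat [] 0 (Nat.succ_pos _) (n_lt_pow x.toNat)]
  simp only [List.foldl_nil, zero_add]
  rw [sps_eq_pow5sum]
  cases hb : (x == (pow5sum x.toNat : Int)) <;> simp_all
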